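-- pv_equiv track=rewrite | github.com/EduardoRdgzA/ABP | scripts/graficas_radar.py | vectores_integracion
-- ===== SOURCE A (Python) =====
-- def list_comprehension(datos:dict) -> list:
--     lista = [datos[key] for key in datos]
--     return lista
--
-- def vectores_integracion(datos:dict) -> dict:
--     """
--     Calcula la integracion entre las diferentes categorías tomando el valor máximo de cada vértice.
--
--     Esta función toma un diccionario donde cada clave es una categoría y su valor es una lista de números.
--     Calcula el valor máximo para cada posición (vértice) entre todas las categorías.
--
--     Args:
--         datos (dict): Diccionario con las categorías y sus valores.
--
--     Returns:
--         dict: Diccionario con una sola clave "integración" y una lista con los valores máximos por vértice.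
--     """
--     dat = list_comprehension(datos)
--     vertices = list(zip(*dat))  # Convertir a lista para poder iterar múltiples veces
--     maximos = [max(u) for u in vertices]
--     integracion = {
--         'integración': maximos,
--     }
--     return integracion
-- ===== SOURCE B (Python) =====
-- def vectores_integracion(datos: dict) -> dict:
--     listas = list(datos.values())
--     if not listas:
--         return {'integración': []}
--     maximos = list(listas[0])
--     for fila in listas[1:]:
--         n = min(len(maximos), len(fila))
--         maximos = [max(maximos[i], fila[i]) for i in range(n)]
--     return {'integración': maximos}
-- ===== Notes on version B (the rewrite author's own statement) =====
-- stated objective: alternative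
-- what changed: Replaces the zip(*...) transpose plus per-column max with a single left-to-right fold over the category rows that maintains a running elementwise-maximum list truncated to the shortest row seen.
import Mathlib
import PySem

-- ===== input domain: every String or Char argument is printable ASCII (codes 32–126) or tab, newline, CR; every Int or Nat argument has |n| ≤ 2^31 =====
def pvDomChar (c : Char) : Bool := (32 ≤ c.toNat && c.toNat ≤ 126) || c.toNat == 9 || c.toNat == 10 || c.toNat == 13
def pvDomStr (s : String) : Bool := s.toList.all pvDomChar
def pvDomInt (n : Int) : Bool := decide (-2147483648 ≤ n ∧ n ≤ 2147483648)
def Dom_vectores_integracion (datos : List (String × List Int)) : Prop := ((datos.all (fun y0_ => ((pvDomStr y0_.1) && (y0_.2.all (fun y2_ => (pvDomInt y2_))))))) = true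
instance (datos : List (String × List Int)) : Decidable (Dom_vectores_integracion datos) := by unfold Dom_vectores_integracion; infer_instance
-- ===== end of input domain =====

-- B replaces the transpose-then-column-max with a fold over rows maintaining a running elementwise maximum (alternative decomposition, same cost).


-- ===== PORT A =====
-- [datos[key] for key in datos]  (dict values in insertion order)
def list_comprehension (datos : List (String × List Int)) : List (List Int) :=
  datos.map Prod.snd

-- helper used by zipStar's termination proof (cited by decreasing_by, so it stays above the port)
theorem pvSumTailLe (ls : List (List Int)) :
    ((ls.map List.tail).map List.length).sum ≤ (ls.map List.length).sum := by
  induction ls with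
  | nil => simp
  | cons x xs ih =>
      simp only [List.map_cons, List.sum_cons]
      have : x.tail.length ≤ x.length := by
        cases x <;> simp
      omega

-- Python's zip(*dat): rows of heads until some list is exhausted
def zipStar (ls : List (List Int)) : List (List Int) :=
  if h : ls = [] ∨ ls.any (·.isEmpty) = true then []
  else (ls.map fun r => r.headD 0) :: zipStar (ls.map List.tail)
termination_by (ls.map List.length).sum
decreasing_by
  have hne : ls ≠ [] := fun e => h (Or.inl e)
  have hany : ls.any (·.isEmpty) = false := by
    cases he : ls.any (·.isEmpty) with
    | false => rfl
    | true => exact absurd (Or.inr he) h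
  cases ls with
  | nil => exact absurd rfl hne
  | cons x xs =>
      simp only [List.any_cons, Bool.or_eq_false_iff] at hany
      have hx : x ≠ [] := by
        intro e; rw [e] at hany; simp at hany
      have h1 : x.tail.length < x.length := by
        cases x with
        | nil => exact absurd rfl hx
        | cons a r => simp
      have h2 := pvSumTailLe xs
      simp only [List.map_cons, List.sum_cons, List.map_subtype, List.unattach_attach]
      omega

-- Python max(u) on a (nonempty) tuple; 0 is unreachable since zip rows are nonempty
def listMax : List Int → Int
  | [] => 0
  | a :: r => r.foldl max a

def vectores_integracion (datos : List (String × List Int)) : List (String × List Int) :=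
  let dat := list_comprehension datos
  let vertices := zipStar dat
  let maximos := vertices.map listMax
  [("integración", maximos)]

-- ===== PORT B =====
-- [max(maximos[i], fila[i]) for i in range(min(len(maximos), len(fila)))]
def bstep (maximos fila : List Int) : List Int :=
  (List.range (min maximos.length fila.length)).map
    (fun i => max (maximos.getD i 0) (fila.getD i 0))

def vectores_integracion_alt (datos : List (String × List Int)) : List (String × List Int) :=
  let listas := datos.map Prod.snd
  match listas with
  | [] => [("integración", ([] : List Int))]
  | h :: t => [("integración", t.foldl bstep h)]

-- ===== PRECONDITION & SPEC =====
def Spec_vectores_integracion (datos : List (String × List Int)) (out : List (String × List Int)) : Prop := out = vectores_integracion_alt datos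
instance (datos : List (String × List Int)) (out : List (String × List Int)) : Decidable (Spec_vectores_integracion datos out) := by unfold Spec_vectores_integracion; infer_instance

-- ===== CLAIM (what is proved, stated in full; the proofs are below) =====
def Claim_equal_vectores_integracion : Prop := ∀ (datos : List (String × List Int)), Dom_vectores_integracion datos → Spec_vectores_integracion datos (vectores_integracion datos)

-- ===== LEMMAS AND PROOFS =====
def colmax (ls : List (List Int)) : List Int := (zipStar ls).map listMax

theorem zipStar_nil : zipStar [] = [] := by rw [zipStar]; simp

theorem zipStar_eq_nil (ls : List (List Int)) (h : ls.any (·.isEmpty) = true) :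
    zipStar ls = [] := by rw [zipStar]; simp [h]

theorem zipStar_unfold (ls : List (List Int)) (h1 : ls ≠ []) (h2 : ls.any (·.isEmpty) = false) :
    zipStar ls = (ls.map fun r => r.headD 0) :: zipStar (ls.map List.tail) := by
  rw [zipStar]; simp [h1, h2]

theorem bstep_nil_left (l : List Int) : bstep [] l = [] := by simp [bstep]

theorem bstep_nil_right (l : List Int) : bstep l [] = [] := by simp [bstep]

theorem bstep_cons (a b : Int) (h l : List Int) :
    bstep (a :: h) (b :: l) = max a b :: bstep h l := by
  simp [bstep, Nat.succ_min_succ, List.range_succ_eq_map, List.map_map, Function.comp_def]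

theorem colmax_single (h : List Int) : colmax [h] = h := by
  induction h with
  | nil => simp [colmax, zipStar_eq_nil]
  | cons a r ih =>
      have h2 : [a :: r].any (·.isEmpty) = false := by simp
      simp only [colmax, zipStar_unfold _ (by simp) h2, List.map_cons, List.map_nil]
      simpa [listMax, colmax] using ih

theorem colmax_merge (h : List Int) : ∀ (l : List Int) (t : List (List Int)),
    colmax (h :: l :: t) = colmax (bstep h l :: t) := by
  induction h with
  | nil =>
      intro l t
      have : ([] :: l :: t).any (·.isEmpty) = true := by simp
      have h2 : (([] : List Int) :: t).any (·.isEmpty) = true := by simp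
      simp [colmax, bstep_nil_left, zipStar_eq_nil _ this, zipStar_eq_nil _ h2]
  | cons a h' ih =>
      intro l t
      cases l with
      | nil =>
          have h1 : ((a :: h') :: ([] : List Int) :: t).any (·.isEmpty) = true := by simp
          have h2 : (([] : List Int) :: t).any (·.isEmpty) = true := by simp
          simp [colmax, bstep_nil_right, zipStar_eq_nil _ h1, zipStar_eq_nil _ h2]
      | cons b l' =>
          by_cases ht : t.any (·.isEmpty) = true
          · have h1 : ((a :: h') :: (b :: l') :: t).any (·.isEmpty) = true := by simp [ht]
            have h2 : ((max a b :: bstep h' l') :: t).any (·.isEmpty) = true := by simp [ht]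
            simp [colmax, bstep_cons, zipStar_eq_nil _ h1, zipStar_eq_nil _ h2]
          · rw [Bool.not_eq_true] at ht
            have h1 : ((a :: h') :: (b :: l') :: t).any (·.isEmpty) = false := by simp [ht]
            have h2 : ((max a b :: bstep h' l') :: t).any (·.isEmpty) = false := by simp [ht]
            rw [bstep_cons]
            simp only [colmax, zipStar_unfold _ (by simp) h1, zipStar_unfold _ (by simp) h2,
              List.map_cons]
            -- heads agree definitionally: foldl max a (b :: hs) = foldl max (max a b) hs
            congr 1
            have := ih l' (t.map List.tail)
            simpa [colmax] using this

theorem colmax_fold (t : List (List Int)) : ∀ (h : List Int),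
    colmax (h :: t) = t.foldl bstep h := by
  induction t with
  | nil => intro h; simpa using colmax_single h
  | cons l t ih =>
      intro h
      rw [List.foldl_cons, ← ih (bstep h l)]
      exact colmax_merge h l t

-- ===== VERDICT (by name: the statement is the Claim_ definition above) =====
theorem vectores_integracion_spec : Claim_equal_vectores_integracion := by
  intro datos _
  unfold Spec_vectores_integracion vectores_integracion vectores_integracion_alt list_comprehension
  cases hv : datos.map Prod.snd with
  | nil => simp [zipStar_nil]
  | cons h t =>
      simp only []
      rw [show (zipStar (h :: t)).map listMax = colmax (h :: t) from rfl, colmax_fold]
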